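-- pv_equiv track=rewrite | github.com/daniel-reich/turbo-robot | WoPJpe3RzxGhLSXkv_3.py | concatenation_sum
-- ===== SOURCE A (Python) =====
-- def concatenation_sum(n):
--     s = 0
--     if n < 10:
--         return n
--     else:
--         x = 9
--         while n > 0:
--             if x < n:
--                 n = n - x
--                 s += x * len(str(x))
--             else:
--                 s += n * len(str(x))
--                 n = 0
--             x *= 10
--     return s
-- ===== SOURCE B (Python) =====
-- def concatenation_sum(n):
--     if n < 10:
--         return n
--     d = len(str(n))
--     return d * (n + 1) - (10 ** d - 1) // 9
-- ===== Notes on version B (the rewrite author's own statement) =====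
-- stated objective: simpler
-- what changed: Replaced A's while-loop that walks the digit-length groups (9, 90, 900, ...) mutating n, x and s by a direct closed-form formula d*(n+1) - (10**d - 1)//9 with d = len(str(n)), keeping A's n < 10 guard.
import Mathlib
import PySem

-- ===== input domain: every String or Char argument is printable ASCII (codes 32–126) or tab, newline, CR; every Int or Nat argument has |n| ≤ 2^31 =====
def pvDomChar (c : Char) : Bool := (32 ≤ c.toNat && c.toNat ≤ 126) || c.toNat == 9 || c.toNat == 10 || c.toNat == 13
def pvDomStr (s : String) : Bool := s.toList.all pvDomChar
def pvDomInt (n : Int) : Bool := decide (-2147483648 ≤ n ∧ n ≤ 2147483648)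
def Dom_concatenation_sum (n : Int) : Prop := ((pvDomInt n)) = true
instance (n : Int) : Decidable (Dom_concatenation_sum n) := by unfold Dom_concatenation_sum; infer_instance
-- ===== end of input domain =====

-- B replaces A's while-loop over the digit-length groups by a closed-form formula (objective: simpler).

-- ===== PORT A =====
-- A's while-loop; the extra hypothesis 0 < x only justifies termination (x starts at 9
-- and is only ever multiplied by 10), the computation is a step-for-step transliteration.
def concatSumLoop (n x s : Int) (hx : 0 < x) : Int :=
  if hn : n > 0 then
    if hlt : x < n then
      concatSumLoop (n - x) (x * 10) (s + x * PySem.Str.len (PySem.Int.toStr x)) (by omega)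
    else
      concatSumLoop 0 (x * 10) (s + n * PySem.Str.len (PySem.Int.toStr x)) (by omega)
  else s
termination_by n.toNat
decreasing_by all_goals omega

def concatenation_sum (n : Int) : Int :=
  if n < 10 then n
  else concatSumLoop n 9 0 (by norm_num)

-- ===== PORT B =====
def concatenation_sum_alt (n : Int) : Int :=
  if n < 10 then n
  else
    let d := PySem.Str.len (PySem.Int.toStr n)
    -- Python's 10 ** d with d = len(str(n)) ≥ 0; ported as 10 ^ d.toNat (exact for d ≥ 0)
    d * (n + 1) - PySem.Int.floordiv (10 ^ d.toNat - 1) 9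

-- ===== PRECONDITION & SPEC =====
def Spec_concatenation_sum (n : Int) (out : Int) : Prop := out = concatenation_sum_alt n
instance (n : Int) (out : Int) : Decidable (Spec_concatenation_sum n out) := by unfold Spec_concatenation_sum; infer_instance

-- ===== CLAIM (what is proved, stated in full; the proofs are below) =====
def Claim_equal_concatenation_sum : Prop := ∀ (n : Int), Dom_concatenation_sum n → Spec_concatenation_sum n (concatenation_sum n)

-- ===== LEMMAS AND PROOFS =====

-- exact length of Nat.toDigitsCore (Mathlib only has the upper bound toDigitsCore_length)
lemma tdc_len : ∀ (f n : Nat) (acc : List Char), n < f →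
    (Nat.toDigitsCore 10 f n acc).length = Nat.log 10 n + 1 + acc.length := by
  intro f
  induction f with
  | zero => omega
  | succ f ih =>
    intro n acc h
    rw [Nat.toDigitsCore]
    by_cases h10 : n / 10 = 0
    · rw [if_pos h10]
      have : n < 10 := by omega
      have hlog : Nat.log 10 n = 0 := Nat.log_eq_zero_iff.2 (Or.inl this)
      simp [hlog]
      omega
    · rw [if_neg h10]
      have hge : 10 ≤ n := by
        by_contra hc
        exact h10 (Nat.div_eq_of_lt (by omega))
      have hrec : n / 10 < f := by
        have := Nat.div_lt_self (by omega : 0 < n) (by norm_num : 1 < 10)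
        omega
      rw [ih (n / 10) _ hrec]
      have h1 : Nat.log 10 (n / 10) = Nat.log 10 n - 1 := Nat.log_div_base 10 n
      have h2 : 0 < Nat.log 10 n := Nat.log_pos (by norm_num) hge
      simp only [List.length_cons]
      omega

lemma len_toStr_pos (m : Int) (h : 0 < m) :
    PySem.Str.len (PySem.Int.toStr m) = ((Nat.log 10 m.toNat + 1 : Nat) : Int) := by
  rw [PySem.Str.len_eq]
  have : (PySem.Int.toStr m).toList = Nat.toDigits 10 m.toNat := by
    rw [PySem.Int.toList_toStr, PySem.Int.toChars, if_neg (by omega)]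
  rw [this, Nat.toDigits, tdc_len _ _ _ (by omega)]
  simp

-- the repunit (10^j - 1)/9 = 11…1, used to express A's grouped sum in closed form
def repunit : Nat → Int
  | 0 => 0
  | j + 1 => 10 * repunit j + 1

lemma nine_repunit (j : Nat) : 9 * repunit j = 10 ^ j - 1 := by
  induction j with
  | zero => simp [repunit]
  | succ j ih => rw [repunit, pow_succ]; linarith

lemma floordiv_repunit (j : Nat) : PySem.Int.floordiv (10 ^ j - 1) 9 = repunit j := by
  rw [PySem.Int.floordiv_eq_iff_of_pos (by norm_num)]
  have := nine_repunit j
  constructor <;> linarith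

-- A's grouped sum, abstracted: x = 9·10^k, digit length k+1 made explicit
def sumLenGroups (k : Nat) (n : Int) : Int :=
  if h : 9 * 10 ^ k < n then
    9 * 10 ^ k * ((k : Int) + 1) + sumLenGroups (k + 1) (n - 9 * 10 ^ k)
  else n * ((k : Int) + 1)
termination_by n.toNat
decreasing_by
  have : (0:Int) < 9 * 10 ^ k := by positivity
  omega

lemma log_nine_pow (k : Nat) : Nat.log 10 (9 * 10 ^ k) = k := by
  apply Nat.log_eq_of_pow_le_of_lt_pow
  · exact Nat.le_mul_of_pos_left _ (by norm_num)
  · rw [pow_succ]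
    have := Nat.pow_pos (show 0 < 10 by norm_num) (n := k)
    linarith

lemma len_toStr_nine_pow (k : Nat) :
    PySem.Str.len (PySem.Int.toStr (9 * 10 ^ k)) = (k : Int) + 1 := by
  rw [len_toStr_pos _ (by positivity)]
  have hcast : ((9:Int) * 10 ^ k) = ((9 * 10 ^ k : Nat) : Int) := by push_cast; ring
  rw [hcast, Int.toNat_natCast, log_nine_pow]
  push_cast; ring

lemma concatSumLoop_congr {n x x' s s' : Int} (h : 0 < x) (h' : 0 < x')
    (hx : x = x') (hs : s = s') : concatSumLoop n x s h = concatSumLoop n x' s' h' := by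
  subst hx; subst hs; rfl

lemma loop_eq_groups (m : Nat) : ∀ (k : Nat) (n s : Int) (hx : 0 < 9 * 10 ^ k),
    0 < n → n.toNat ≤ m →
    concatSumLoop n (9 * 10 ^ k) s hx = s + sumLenGroups k n := by
  induction m with
  | zero => intro k n s hx hn hm; omega
  | succ m ih =>
    intro k n s hx hn hm
    rw [concatSumLoop, dif_pos hn, sumLenGroups]
    by_cases hlt : 9 * 10 ^ k < n
    · rw [dif_pos hlt, dif_pos hlt]
      have hmul : (9 * 10 ^ k : Int) * 10 = 9 * 10 ^ (k + 1) := by rw [pow_succ]; ring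
      have h9 : (0:Int) < 9 * 10 ^ k := by positivity
      rw [len_toStr_nine_pow]
      have hrw := ih (k + 1) (n - 9 * 10 ^ k)
        (s + 9 * 10 ^ k * ((k : Int) + 1)) (by positivity) (by omega) (by omega)
      rw [concatSumLoop_congr _ (by positivity) hmul rfl, hrw]; ring
    · rw [dif_neg hlt, dif_neg hlt]
      rw [concatSumLoop, dif_neg (by omega : ¬ (0:Int) > 0), len_toStr_nine_pow]

lemma groups_closed (m : Nat) : ∀ (k d : Nat) (n : Int), 0 < n → n.toNat ≤ m →
    (10:Int) ^ d ≤ 10 ^ k + n - 1 → 10 ^ k + n - 1 < 10 ^ (d + 1) →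
    sumLenGroups k n =
      ((d : Int) + 1) * (10 ^ k + n) - repunit (d + 1) - ((k : Int) * 10 ^ k - repunit k) := by
  induction m with
  | zero => intro k d n hn hm; omega
  | succ m ih =>
    intro k d n hn hm hlo hhi
    rw [sumLenGroups]
    by_cases hlt : 9 * 10 ^ k < n
    · rw [dif_pos hlt]
      have h9 : (0:Int) < 9 * 10 ^ k := by positivity
      have hsame : (10:Int) ^ (k + 1) + (n - 9 * 10 ^ k) - 1 = 10 ^ k + n - 1 := by
        rw [pow_succ]; ring
      have hrec := ih (k + 1) d (n - 9 * 10 ^ k) (by omega) (by omega)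
        (by rw [hsame]; exact hlo) (by rw [hsame]; exact hhi)
      rw [hrec]
      have h1 := nine_repunit k
      have hpow : (10:Int) ^ (k + 1) = 10 * 10 ^ k := by rw [pow_succ]; ring
      rw [show repunit (k + 1) = 10 * repunit k + 1 from rfl, hpow]
      push_cast
      linear_combination h1
    · rw [dif_neg hlt]
      -- here the whole remainder fits in one digit-group, so d = k
      have h10 : (1:Int) < 10 := by norm_num
      have hdk : d ≤ k := by
        by_contra hc
        have : (10:Int) ^ (k + 1) ≤ 10 ^ d := pow_le_pow_right₀ (by norm_num) (by omega)
        have : (10:Int) ^ (k + 1) ≤ 10 ^ k + n - 1 := le_trans this hlo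
        rw [pow_succ] at this
        omega
      have hkd : k ≤ d := by
        by_contra hc
        have : (10:Int) ^ (d + 1) ≤ 10 ^ k := pow_le_pow_right₀ (by norm_num) (by omega)
        omega
      have : d = k := le_antisymm hdk hkd
      subst this
      have h1 := nine_repunit d
      rw [show repunit (d + 1) = 10 * repunit d + 1 from rfl]
      linear_combination h1

-- ===== VERDICT (by name: the statement is the Claim_ definition above) =====
theorem concatenation_sum_spec : Claim_equal_concatenation_sum := by
  unfold Claim_equal_concatenation_sum
  intro n _
  unfold Spec_concatenation_sum concatenation_sum concatenation_sum_alt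
  by_cases h : n < 10
  · simp [h]
  · rw [if_neg h, if_neg h]
    have hn : 0 < n := by omega
    have hnn : (1:Nat) ≤ n.toNat := by omega
    set L := Nat.log 10 n.toNat with hL
    have hlo : (10:Int) ^ L ≤ n := by
      have := Nat.pow_log_le_self 10 (x := n.toNat) (by omega)
      have : ((10 ^ L : Nat) : Int) ≤ ((n.toNat : Nat) : Int) := by exact_mod_cast this
      push_cast at this
      omega
    have hhi : n < (10:Int) ^ (L + 1) := by
      have := Nat.lt_pow_succ_log_self (by norm_num : 1 < 10) n.toNat
      have : ((n.toNat : Nat) : Int) < ((10 ^ (L + 1) : Nat) : Int) := by exact_mod_cast this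
      push_cast at this
      omega
    have hA : concatSumLoop n 9 0 (by norm_num) = sumLenGroups 0 n := by
      have := loop_eq_groups n.toNat 0 n 0 (by norm_num) hn (le_refl _)
      simpa using this
    rw [hA, groups_closed n.toNat 0 L n hn (le_refl _) (by simpa using hlo)
      (by simpa using hhi)]
    have hd : PySem.Str.len (PySem.Int.toStr n) = ((L + 1 : Nat) : Int) := len_toStr_pos n hn
    rw [hd]
    simp only [Int.toNat_natCast, floordiv_repunit]
    rw [show repunit 0 = 0 from rfl]
    push_cast
    ring
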